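-- pv_equiv track=rewrite | github.com/ae-chae/algorithm | 프로그래머스/1/1845. 폰켓몬/폰켓몬.py | solution
-- ===== SOURCE A (Python) =====
-- def solution(nums):
--     answer = 0
--     count = len(nums) // 2  # 나눗셈 결과를 정수로 변환
--
--     unique_nums = set()  # set 객체를 생성
--
--     for i in nums:
--         unique_nums.add(i)  # set에 요소를 추가
--
--     if len(unique_nums) < count:
--         answer = len(unique_nums)
--     else:
--         answer = count
--
--     return answer
-- ===== SOURCE B (Python) =====
-- def solution(nums):
--     s = sorted(nums)
--     distinct = 0
--     prev = None
--     for x in s: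
--         if prev is None or x != prev:
--             distinct += 1
--         prev = x
--     return min(distinct, len(nums) // 2)
-- ===== Notes on version B (the rewrite author's own statement) =====
-- stated objective: alternative
-- what changed: Replaces the hash-set dedup with a sort-then-scan pass that counts distinct values by comparing neighbours, and an explicit min() instead of the if/else.
import Mathlib
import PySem

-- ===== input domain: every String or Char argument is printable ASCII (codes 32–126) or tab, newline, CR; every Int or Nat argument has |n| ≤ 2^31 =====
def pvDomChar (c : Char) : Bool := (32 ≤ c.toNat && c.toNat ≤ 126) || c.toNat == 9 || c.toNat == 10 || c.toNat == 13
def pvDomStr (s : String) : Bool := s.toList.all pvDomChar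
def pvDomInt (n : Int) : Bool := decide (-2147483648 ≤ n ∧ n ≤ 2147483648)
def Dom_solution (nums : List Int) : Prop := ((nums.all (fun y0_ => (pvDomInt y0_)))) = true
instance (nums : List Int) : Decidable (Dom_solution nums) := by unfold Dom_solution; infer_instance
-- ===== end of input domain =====

-- B replaces A's hash-set dedup by a sort-then-scan distinct count (alternative decomposition; return value identical).


-- ===== PORT A =====
def solution (nums : List Int) : Int :=
  let count : Int := PySem.Int.floordiv (nums.length : Int) 2
  let unique : PySem.Set Int := nums.foldl PySem.Set.add PySem.Set.empty
  if PySem.Set.len unique < count then PySem.Set.len unique else count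

-- ===== PORT B =====
-- the 'for x in s' loop of Source B, carrying (prev, distinct)
def solCountLoop : Option Int → Int → List Int → Int
  | _, distinct, [] => distinct
  | prev, distinct, x :: rest =>
      solCountLoop (some x) (if prev = some x then distinct else distinct + 1) rest

def solution_alt (nums : List Int) : Int :=
  let s := PySem.List.sorted nums (fun x => x) false
  let distinct := solCountLoop none 0 s
  min distinct (PySem.Int.floordiv (nums.length : Int) 2)

-- ===== PRECONDITION & SPEC =====
def Spec_solution (nums : List Int) (out : Int) : Prop := out = solution_alt nums
instance (nums : List Int) (out : Int) : Decidable (Spec_solution nums out) := by unfold Spec_solution; infer_instance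

-- ===== CLAIM (what is proved, stated in full; the proofs are below) =====
def Claim_equal_solution : Prop := ∀ (nums : List Int), Dom_solution nums → Spec_solution nums (solution nums)

-- ===== LEMMAS AND PROOFS =====

lemma erase_insert_self_eq {T : Finset Int} (x : Int) :
    (insert x T).erase x = T.erase x := by
  ext a; simp [Finset.mem_erase, Finset.mem_insert]

lemma card_insert_eq_card_erase (x : Int) (T : Finset Int) :
    (insert x T).card = (T.erase x).card + 1 := by
  have h1 : insert x T = insert x (T.erase x) := by
    ext a; simp [Finset.mem_erase, Finset.mem_insert]; tauto
  rw [h1, Finset.card_insert_of_notMem (Finset.notMem_erase x T)]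

-- scanning a sorted tail with previous element x counts the distinct values other than x
lemma solCountLoop_some (t : List Int) : ∀ (x c : Int),
    t.Pairwise (· ≤ ·) → (∀ y ∈ t, x ≤ y) →
    solCountLoop (some x) c t = c + ((t.toFinset.erase x).card : Int) := by
  induction t with
  | nil => intro x c _ _; simp [solCountLoop]
  | cons y t' ih =>
    intro x c hp hlb
    have hp' : t'.Pairwise (· ≤ ·) := (List.pairwise_cons.mp hp).2
    have hyb : ∀ z ∈ t', y ≤ z := (List.pairwise_cons.mp hp).1
    by_cases hxy : y = x
    · subst hxy
      have : solCountLoop (some y) c (y :: t') = solCountLoop (some y) c t' := by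
        simp [solCountLoop]
      rw [this, ih y c hp' hyb]
      have : ((y :: t').toFinset).erase y = t'.toFinset.erase y := by
        rw [List.toFinset_cons, erase_insert_self_eq]
      rw [this]
    · have hxlt : x < y := lt_of_le_of_ne (hlb y (by simp)) (fun h => hxy h.symm)
      have hstep : solCountLoop (some x) c (y :: t') = solCountLoop (some y) (c + 1) t' := by
        simp only [solCountLoop]
        rw [if_neg (fun h => hxy (Option.some.inj h).symm)]
      rw [hstep, ih y (c + 1) hp' hyb]
      have hxnot : x ∉ (y :: t').toFinset := by
        simp only [List.mem_toFinset, List.mem_cons]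
        rintro (h | h)
        · exact hxy h.symm
        · exact absurd (hyb x h) (not_le.mpr hxlt)
      rw [Finset.erase_eq_of_notMem hxnot]
      have : (y :: t').toFinset = insert y t'.toFinset := List.toFinset_cons
      rw [this, card_insert_eq_card_erase]
      push_cast; ring

-- scanning a whole sorted list from prev = None counts all distinct values
lemma solCountLoop_none (t : List Int) (hp : t.Pairwise (· ≤ ·)) :
    solCountLoop none 0 t = (t.toFinset.card : Int) := by
  cases t with
  | nil => simp [solCountLoop]
  | cons x t' =>
    have hp' : t'.Pairwise (· ≤ ·) := (List.pairwise_cons.mp hp).2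
    have hlb : ∀ y ∈ t', x ≤ y := (List.pairwise_cons.mp hp).1
    have : solCountLoop none 0 (x :: t') = solCountLoop (some x) 1 t' := by
      simp [solCountLoop]
    rw [this, solCountLoop_some t' x 1 hp' hlb, List.toFinset_cons,
        card_insert_eq_card_erase]
    push_cast; ring

lemma setlen_eq_card (nums : List Int) :
    PySem.Set.len (nums.foldl PySem.Set.add PySem.Set.empty) = (nums.toFinset.card : Int) := by
  have hfold : nums.foldl PySem.Set.add PySem.Set.empty = PySem.Set.ofList nums :=
    (PySem.Set.ofList_eq_foldl nums).symm
  have hnodup := PySem.Set.nodup_ofList nums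
  have hfin : (PySem.Set.ofList nums).toFinset = nums.toFinset := by
    ext a; simp [List.mem_toFinset, PySem.Set.mem_ofList]
  have hlen : (PySem.Set.ofList nums).length = nums.toFinset.card := by
    rw [← hfin, List.toFinset_card_of_nodup hnodup]
  simp only [hfold, PySem.Set.len, hlen]

-- ===== VERDICT (by name: the statement is the Claim_ definition above) =====
theorem solution_spec : Claim_equal_solution := by
  intro nums _
  unfold Spec_solution solution solution_alt
  have hperm : (PySem.List.sorted nums (fun x => x) false).Perm nums :=
    PySem.List.sorted_perm nums (fun x => x) false
  have hpair : (PySem.List.sorted nums (fun x => x) false).Pairwise (· ≤ ·) :=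
    PySem.List.sorted_pairwise nums (fun x => x)
  have hcount := solCountLoop_none _ hpair
  have hfin : (PySem.List.sorted nums (fun x => x) false).toFinset = nums.toFinset :=
    List.toFinset_eq_of_perm _ _ hperm
  simp only [setlen_eq_card, hcount, hfin]
  rw [min_def]
  split_ifs <;> omega
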